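-- pv_equiv track=rewrite | github.com/NicoKNL/coding-problems | kattis/stretching.py | s_can_be_reduced_to_word
-- ===== SOURCE A (Python) =====
-- def findStartingPositions(s, word):
--     positions = []
--     length = len(word)
--
--     for i in range(0, len(s) + 1 - length):
--         w = s[i : i + length]
--
--         if w == word:
--             positions.append(i)
--
--     return positions
--
-- def extractAtPosition(s, char_count, i):
--     return s[:i] + s[i + char_count :]
--
-- def s_can_be_reduced_to_word(s, word, cache):
--     if s == "":
--         return True
--
--     if s in cache:
--         return False
--
--     starting_positions = findStartingPositions(s, word)
--     found = False
--
--     for p in starting_positions: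
--         new_s = extractAtPosition(s, len(word), p)
--         found = s_can_be_reduced_to_word(new_s, word, cache)
--
--         if found:
--             break
--         else:
--             cache.add(new_s)
--
--     return found
-- ===== SOURCE B (Python) =====
-- def s_can_be_reduced_to_word(s, word, cache):
--     # Level-by-level BFS over the strings reachable by deleting one occurrence of
--     # `word` at a time; `cache` entries are treated as dead states (as in A).
--     # Return-value equivalence only: A mutates `cache` (adds failed states), B does not.
--     if s == "":
--         return True
--     if s in cache:
--         return False
--     if word == "":
--         return False  # deleting an empty word never shrinks s
--     k = len(word)
--     frontier = {s}
--     while frontier: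
--         nxt = set()
--         for t in frontier:
--             for i in range(len(t) - k + 1):
--                 if t[i:i + k] == word:
--                     u = t[:i] + t[i + k:]
--                     if u == "":
--                         return True
--                     if u not in cache:
--                         nxt.add(u)
--         frontier = nxt
--     return False
-- ===== Notes on version B (the rewrite author's own statement) =====
-- stated objective: alternative
-- what changed: A's recursive DFS with a shared mutable failure-cache set is replaced by an iterative level-by-level BFS over the set of strings reachable by deleting one occurrence of word, with per-level set deduplication and no cache mutation (and no recursion, so no RecursionError on word='').
-- crash fix: When word == '' and s is a non-empty string not in cache, A recurses forever on the unchanged string and raises RecursionError; B returns False (deleting an empty word never shrinks s). — e.g. on s_can_be_reduced_to_word("a", "", []): A raises RecursionError, B returns false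
import Mathlib
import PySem

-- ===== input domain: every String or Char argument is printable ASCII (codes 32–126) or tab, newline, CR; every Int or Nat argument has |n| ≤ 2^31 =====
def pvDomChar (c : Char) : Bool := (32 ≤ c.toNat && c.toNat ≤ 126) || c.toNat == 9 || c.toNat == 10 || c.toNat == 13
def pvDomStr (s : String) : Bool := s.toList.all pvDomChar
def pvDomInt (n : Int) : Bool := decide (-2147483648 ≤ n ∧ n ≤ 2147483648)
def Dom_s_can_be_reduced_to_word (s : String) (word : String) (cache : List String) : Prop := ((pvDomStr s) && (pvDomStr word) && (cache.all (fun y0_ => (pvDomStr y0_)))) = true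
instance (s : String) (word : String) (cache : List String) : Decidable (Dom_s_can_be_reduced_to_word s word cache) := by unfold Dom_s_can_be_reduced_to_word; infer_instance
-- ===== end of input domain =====

-- B replaces A's recursive DFS-with-failure-cache by a level-by-level BFS over reachable
-- strings (alternative algorithm, similar cost); return-value equivalence only: the Python A
-- mutates `cache` in place (adds failed states), B does not.

-- ===== PORT A =====
-- A's helper: all indices where `word` occurs in `s`
def findStartingPositions (s word : List Char) : List Int :=
  (PySem.List.pyRange 0 ((s.length : Int) + 1 - (word.length : Int))).foldl
    (fun positions i =>
      if PySem.List.slice s (some i) (some (i + (word.length : Int))) == word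
      then positions ++ [i] else positions) []

-- A's helper: s[:i] + s[i+char_count:]
def extractAtPosition (s : List Char) (charCount i : Int) : List Char :=
  PySem.List.slice s none (some i) ++ PySem.List.slice s (some (i + charCount)) none

-- A's recursion, cache threaded through (Python mutates the set in place); fuel bounds the
-- recursion depth and is never exhausted when word ≠ "" (each call strictly shortens s)
def sRec : Nat → List Char → List Char → PySem.Set (List Char) → Bool × PySem.Set (List Char)
  | 0, _, _, cache => (false, cache)
  | fuel+1, s, word, cache =>
    if s == [] then (true, cache)
    else if PySem.Set.contains cache s then (false, cache)
    else
      (findStartingPositions s word).foldl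
        (fun st p =>
          if st.1 then st  -- `break` once found
          else
            let new_s := extractAtPosition s (word.length : Int) p
            let r := sRec fuel new_s word st.2
            if r.1 then (true, r.2) else (false, PySem.Set.add r.2 new_s))
        (false, cache)

def s_can_be_reduced_to_word (s : String) (word : String) (cache : List String) : Bool :=
  (sRec (s.toList.length + 1) s.toList word.toList
    (PySem.Set.ofList (cache.map String.toList))).1

-- ===== PORT B =====
-- one BFS level: scan every t in the frontier, every occurrence of word in t;
-- state = (found empty string?, next frontier as a set); fuel bounds the number of levels
def bLevels : Nat → List Char → PySem.Set (List Char) → PySem.Set (List Char) → Bool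
  | 0, _, _, _ => false
  | fuel+1, word, cacheL, frontier =>
    if frontier == ([] : List (List Char)) then false
    else
      let st :=
        frontier.foldl
          (fun st t =>
            (PySem.List.pyRange 0 ((t.length : Int) - (word.length : Int) + 1)).foldl
              (fun st2 i =>
                if st2.1 then st2  -- early `return True`
                else if PySem.List.slice t (some i) (some (i + (word.length : Int))) == word then
                  let u := PySem.List.slice t none (some i) ++
                           PySem.List.slice t (some (i + (word.length : Int))) none
                  if u == ([] : List Char) then (true, st2.2)
                  else if PySem.Set.contains cacheL u then st2
                  else (false, PySem.Set.add st2.2 u)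
                else st2)
              st)
          (false, PySem.Set.empty)
      if st.1 then true else bLevels fuel word cacheL st.2

def s_can_be_reduced_to_word_alt (s : String) (word : String) (cache : List String) : Bool :=
  if s.toList == ([] : List Char) then true
  else if PySem.Set.contains (PySem.Set.ofList (cache.map String.toList)) s.toList then false
  else if word.toList == ([] : List Char) then false
  else
    bLevels s.toList.length word.toList (PySem.Set.ofList (cache.map String.toList))
      (PySem.Set.add PySem.Set.empty s.toList)

-- ===== PRECONDITION & SPEC =====
-- Pre_ excludes exactly the inputs where Python A diverges into RecursionError:
-- word = "" with s ≠ "" and s ∉ cache (deleting "" leaves s unchanged forever).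
def Pre_s_can_be_reduced_to_word (s : String) (word : String) (cache : List String) : Prop :=
  word ≠ "" ∨ s = "" ∨ s ∈ cache
instance (s : String) (word : String) (cache : List String) : Decidable (Pre_s_can_be_reduced_to_word s word cache) := by unfold Pre_s_can_be_reduced_to_word; infer_instance

def pvWitness_s_can_be_reduced_to_word : String × String × List String := ("abab", "ab", ["b"])

-- A raises RecursionError when word = "", s ≠ "" and s ∉ cache; B returns false there
-- (deleting an empty word can never reduce s to empty).
def Raises_s_can_be_reduced_to_word (s : String) (word : String) (cache : List String) : Prop :=
  word = "" ∧ s ≠ "" ∧ ¬ s ∈ cache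
instance (s : String) (word : String) (cache : List String) : Decidable (Raises_s_can_be_reduced_to_word s word cache) := by unfold Raises_s_can_be_reduced_to_word; infer_instance
def pvRaiseWitness_s_can_be_reduced_to_word : String × String × List String := ("a", "", [])
def pvRaiseWitnessOut_s_can_be_reduced_to_word : Bool := false

def Spec_s_can_be_reduced_to_word (s : String) (word : String) (cache : List String) (out : Bool) : Prop := out = s_can_be_reduced_to_word_alt s word cache
instance (s : String) (word : String) (cache : List String) (out : Bool) : Decidable (Spec_s_can_be_reduced_to_word s word cache out) := by unfold Spec_s_can_be_reduced_to_word; infer_instance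

-- ===== CLAIM (what is proved, stated in full; the proofs are below) =====
def Claim_equal_s_can_be_reduced_to_word : Prop := ∀ (s : String) (word : String) (cache : List String), Dom_s_can_be_reduced_to_word s word cache → Pre_s_can_be_reduced_to_word s word cache → Spec_s_can_be_reduced_to_word s word cache (s_can_be_reduced_to_word s word cache)

def Claim_raises_s_can_be_reduced_to_word : Prop := (∀ (s : String) (word : String) (cache : List String), Dom_s_can_be_reduced_to_word s word cache → Raises_s_can_be_reduced_to_word s word cache → ¬ Pre_s_can_be_reduced_to_word s word cache) ∧ (Dom_s_can_be_reduced_to_word (pvRaiseWitness_s_can_be_reduced_to_word.1) (pvRaiseWitness_s_can_be_reduced_to_word.2.1) (pvRaiseWitness_s_can_be_reduced_to_word.2.2) ∧ Raises_s_can_be_reduced_to_word (pvRaiseWitness_s_can_be_reduced_to_word.1) (pvRaiseWitness_s_can_be_reduced_to_word.2.1) (pvRaiseWitness_s_can_be_reduced_to_word.2.2) ∧ s_can_be_reduced_to_word_alt (pvRaiseWitness_s_can_be_reduced_to_word.1) (pvRaiseWitness_s_can_be_reduced_to_word.2.1) (pvRaiseWitness_s_can_be_reduced_to_word.2.2) =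 pvRaiseWitnessOut_s_can_be_reduced_to_word)

-- ===== LEMMAS AND PROOFS =====

-- occurrence positions of word in t, as naturals
def posNat (t word : List Char) : List Nat :=
  (List.range (t.length + 1 - word.length)).filter
    (fun i => (t.drop i).take word.length == word)

-- the string after deleting the occurrence at position i
def cut (t word : List Char) (i : Nat) : List Char := t.take i ++ t.drop (i + word.length)

-- the pure semantics both ports compute: reducible to [] avoiding the states in V
def Rspec (word : List Char) (V : PySem.Set (List Char)) : Nat → List Char → Bool
  | 0, _ => false
  | f+1, s =>
    if s = [] then true
    else if s ∈ V then false
    else (posNat s word).any fun i => Rspec word V f (cut s word i)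

lemma mem_posNat {t word : List Char} {i : Nat} :
    i ∈ posNat t word ↔ i + word.length ≤ t.length ∧ (t.drop i).take word.length = word := by
  unfold posNat
  simp only [List.mem_filter, List.mem_range, beq_iff_eq]
  constructor
  · rintro ⟨h1, h2⟩; exact ⟨by omega, h2⟩
  · rintro ⟨h1, h2⟩; exact ⟨by omega, h2⟩

lemma len_cut {t word : List Char} {i : Nat} (h : i ∈ posNat t word) :
    (cut t word i).length + word.length = t.length := by
  have h := mem_posNat.mp h
  unfold cut
  simp only [List.length_append, List.length_take, List.length_drop]
  omega

-- pyRange bridge, in the two spellings the two ports use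
lemma pyRange_bridge_A (n k : Nat) :
    PySem.List.pyRange 0 ((n : Int) + 1 - (k : Int)) =
      (List.range (n + 1 - k)).map (fun (i : Nat) => (i : Int)) := by
  rw [PySem.List.pyRange_one]
  have h : ((n : Int) + 1 - (k : Int) - 0).toNat = n + 1 - k := by omega
  rw [h]
  simp only [zero_add]

lemma pyRange_bridge_B (n k : Nat) :
    PySem.List.pyRange 0 ((n : Int) - (k : Int) + 1) =
      (List.range (n + 1 - k)).map (fun (i : Nat) => (i : Int)) := by
  rw [PySem.List.pyRange_one]
  have h : ((n : Int) - (k : Int) + 1 - 0).toNat = n + 1 - k := by omega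
  rw [h]
  simp only [zero_add]

lemma fsp_aux (s word : List Char) : ∀ (l : List Nat) (acc : List Int),
    List.foldl (fun (positions : List Int) (i : Int) =>
      if PySem.List.slice s (some i) (some (i + (word.length : Int))) == word
      then positions ++ [i] else positions) acc (l.map (fun (i : Nat) => (i : Int)))
    = acc ++ (l.filter (fun i => (s.drop i).take word.length == word)).map (fun (i : Nat) => (i : Int)) := by
  intro l
  induction l with
  | nil => intro acc; simp
  | cons i t ih =>
    intro acc
    simp only [List.map_cons, List.foldl_cons, PySem.List.slice_natCast_add, List.filter_cons]
    cases h : ((s.drop i).take word.length == word) with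
    | true =>
      simp only [if_true, ih]
      simp [List.append_assoc]
    | false =>
      simp only [Bool.false_eq_true, if_false, ih]

lemma findStartingPositions_eq (s word : List Char) :
    findStartingPositions s word = (posNat s word).map (fun (i : Nat) => (i : Int)) := by
  unfold findStartingPositions posNat
  rw [pyRange_bridge_A, fsp_aux]
  simp

lemma extractAtPosition_eq (s word : List Char) (i : Nat) :
    extractAtPosition s (word.length : Int) (i : Int) = cut s word i := by
  unfold extractAtPosition cut
  rw [PySem.List.slice_to_natCast]
  have h : ((i : Int) + (word.length : Int)) = ((i + word.length : Nat) : Int) := by push_cast; ring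
  rw [h, PySem.List.slice_from_natCast]

-- Rspec does not depend on the fuel once it exceeds the string length
lemma Rspec_stable {word : List Char} (hw : word ≠ []) (V : PySem.Set (List Char)) :
    ∀ f g s, s.length < f → s.length < g → Rspec word V f s = Rspec word V g s := by
  intro f
  induction f with
  | zero => intro g s hf; omega
  | succ f ihf =>
    intro g s hf hg
    cases g with
    | zero => omega
    | succ g =>
      simp only [Rspec]
      by_cases hs : s = []
      · simp [hs]
      · by_cases hv : s ∈ V
        · simp [hs, hv]
        · simp only [hs, hv, if_false]
          apply PySem.List.any_congr_mem
          intro i hi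
          have hk : 0 < word.length := List.length_pos_iff.mpr hw
          have hl := len_cut hi
          have hsl : 0 < s.length := List.length_pos_iff.mpr hs
          exact ihf g (cut s word i) (by omega) (by omega)

-- cache extension invariant: c contains V, and every extra entry is a non-empty dead state
def DeadExt (word : List Char) (V c : PySem.Set (List Char)) : Prop :=
  (∀ x ∈ V, x ∈ c) ∧ ∀ x ∈ c, x ∈ V ∨ (x ≠ [] ∧ Rspec word V (x.length + 1) x = false)

-- folds whose state already says "found" do nothing
lemma foldl_fst_true {α β : Type} (f : (Bool × β) → α → (Bool × β))
    (hf : ∀ st x, st.1 = true → f st x = st) :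
    ∀ (l : List α) (x : β), l.foldl f (true, x) = (true, x) := by
  intro l
  induction l with
  | nil => intro x; rfl
  | cons a t ih => intro x; simp only [List.foldl_cons, hf (true, x) a rfl]; exact ih x

lemma contains_iff_mem (c : PySem.Set (List Char)) (x : List Char) :
    PySem.Set.contains c x = true ↔ x ∈ c := by
  simp [PySem.Set.contains]

-- A's inner loop over the occurrence positions
lemma sRec_loop {word : List Char} (hw : word ≠ []) (V : PySem.Set (List Char))
    (fuel : Nat) (s : List Char)
    (hIH : ∀ ns c, ns.length < fuel → DeadExt word V c →
      (sRec fuel ns word c).1 = Rspec word V fuel ns ∧ DeadExt word V (sRec fuel ns word c).2)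
    (hfuel : 0 < fuel) (hslen : s.length ≤ fuel) :
    ∀ (is : List Nat) (c : PySem.Set (List Char)), (∀ i ∈ is, i ∈ posNat s word) → DeadExt word V c →
      (is.foldl (fun st (i : Nat) =>
          if st.1 then st
          else if (sRec fuel (cut s word i) word st.2).1 then (true, (sRec fuel (cut s word i) word st.2).2)
          else (false, PySem.Set.add (sRec fuel (cut s word i) word st.2).2 (cut s word i))) (false, c)).1
        = is.any (fun i => Rspec word V fuel (cut s word i)) ∧
      DeadExt word V ((is.foldl (fun st (i : Nat) =>
          if st.1 then st
          else if (sRec fuel (cut s word i) word st.2).1 then (true, (sRec fuel (cut s word i) word st.2).2)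
          else (false, PySem.Set.add (sRec fuel (cut s word i) word st.2).2 (cut s word i))) (false, c)).2) := by
  intro is
  induction is with
  | nil => intro c _ hc; exact ⟨rfl, hc⟩
  | cons i t iht =>
    intro c hmem hc
    have hi : i ∈ posNat s word := hmem i (List.mem_cons_self ..)
    have hk : 0 < word.length := List.length_pos_iff.mpr hw
    have hcutlen : (cut s word i).length < fuel := by
      have := len_cut hi; omega
    obtain ⟨h1, h2⟩ := hIH (cut s word i) c hcutlen hc
    simp only [List.foldl_cons, Bool.false_eq_true, if_false]
    cases hr : (sRec fuel (cut s word i) word c).1 with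
    | true =>
      simp only [if_true]
      rw [foldl_fst_true]
      · constructor
        · simp only [List.any_cons, ← h1, hr, Bool.true_or]
        · exact h2
      · intro st x h; simp [h]
    | false =>
      simp only [Bool.false_eq_true, if_false]
      have hne : cut s word i ≠ [] := by
        intro hnil
        rw [hnil] at h1 hr
        rw [hr] at h1
        cases fuel with
        | zero => omega
        | succ f => simp [Rspec] at h1
      have hdead : Rspec word V ((cut s word i).length + 1) (cut s word i) = false := by
        rw [← Rspec_stable hw V fuel ((cut s word i).length + 1) (cut s word i) hcutlen (Nat.lt_succ_self _)]
        rw [← h1, hr]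
      have hcadd : DeadExt word V (PySem.Set.add (sRec fuel (cut s word i) word c).2 (cut s word i)) := by
        constructor
        · intro x hx
          rw [PySem.Set.mem_add]
          exact Or.inl (h2.1 x hx)
        · intro x hx
          rw [PySem.Set.mem_add] at hx
          rcases hx with hx | hx
          · exact h2.2 x hx
          · subst hx; exact Or.inr ⟨hne, hdead⟩
      obtain ⟨g1, g2⟩ := iht (PySem.Set.add (sRec fuel (cut s word i) word c).2 (cut s word i))
        (fun j hj => hmem j (List.mem_cons_of_mem _ hj)) hcadd
      refine ⟨?_, g2⟩
      rw [g1]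
      simp only [List.any_cons, ← h1, hr, Bool.false_or]

lemma sRec_spec {word : List Char} (hw : word ≠ []) (V : PySem.Set (List Char)) :
    ∀ fuel s c, s.length < fuel → DeadExt word V c →
      (sRec fuel s word c).1 = Rspec word V fuel s ∧ DeadExt word V (sRec fuel s word c).2 := by
  intro fuel
  induction fuel with
  | zero => intro s c h; omega
  | succ fuel ih =>
    intro s c hlen hc
    by_cases hs : s = []
    · subst hs; simp only [sRec, Rspec]; simp [hc]
    · have hsb : (s == ([] : List Char)) = false := by simp [hs]
      by_cases hcon : PySem.Set.contains c s = true
      · have hmem : s ∈ c := (contains_iff_mem c s).mp hcon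
        have hfalse : Rspec word V (fuel + 1) s = false := by
          rcases hc.2 s hmem with hv | ⟨_, hdead⟩
          · simp [Rspec, hs, hv]
          · rw [Rspec_stable hw V (fuel + 1) (s.length + 1) s hlen (Nat.lt_succ_self _)]
            exact hdead
        simp only [sRec, hsb, Bool.false_eq_true, if_false, hcon, if_true]
        exact ⟨hfalse.symm, hc⟩
      · have hnc : s ∉ c := fun h => hcon ((contains_iff_mem c s).mpr h)
        have hnv : s ∉ V := fun h => hnc (hc.1 s h)
        have hfuel : 0 < fuel := by
          have : 0 < s.length := List.length_pos_iff.mpr hs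
          omega
        simp only [sRec, hsb, Bool.false_eq_true, if_false, hcon]
        rw [findStartingPositions_eq, List.foldl_map]
        simp only [extractAtPosition_eq]
        have hRs : Rspec word V (fuel + 1) s
            = (posNat s word).any (fun i => Rspec word V fuel (cut s word i)) := by
          simp [Rspec, hs, hnv]
        rw [hRs]
        exact sRec_loop hw V fuel s ih hfuel (by omega) (posNat s word) c (fun i hi => hi) hc

-- B-side: the Nat-level inner step after bridging Python's range/slices
def bStepN (word : List Char) (V : PySem.Set (List Char)) (t : List Char) :
    (Bool × PySem.Set (List Char)) → Nat → (Bool × PySem.Set (List Char)) := fun st2 i =>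
  if st2.1 then st2
  else if (t.drop i).take word.length == word then
    if cut t word i == ([] : List Char) then (true, st2.2)
    else if PySem.Set.contains V (cut t word i) then st2
    else (false, PySem.Set.add st2.2 (cut t word i))
  else st2

lemma cutB_eq (t word : List Char) (i : Nat) :
    PySem.List.slice t none (some (i : Int)) ++
      PySem.List.slice t (some ((i : Int) + (word.length : Int))) none = cut t word i := by
  unfold cut
  rw [PySem.List.slice_to_natCast]
  have h : ((i : Int) + (word.length : Int)) = ((i + word.length : Nat) : Int) := by push_cast; ring
  rw [h, PySem.List.slice_from_natCast]

-- did some occurrence scan find the empty string?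
def emptyHitT (word t : List Char) (is : List Nat) : Bool :=
  is.any (fun i => ((t.drop i).take word.length == word) && (cut t word i == ([] : List Char)))

lemma bStepN_true (word : List Char) (V : PySem.Set (List Char)) (t : List Char)
    (st : Bool × PySem.Set (List Char)) (i : Nat) (h : st.1 = true) :
    bStepN word V t st i = st := by
  simp [bStepN, h]

lemma bInnerChar (word : List Char) (V : PySem.Set (List Char)) (t : List Char) :
    ∀ (is : List Nat) (st : Bool × PySem.Set (List Char)), st.1 = false →
      (is.foldl (bStepN word V t) st).1 = emptyHitT word t is ∧
      ((is.foldl (bStepN word V t) st).1 = false → ∀ u,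
        u ∈ (is.foldl (bStepN word V t) st).2 ↔
          u ∈ st.2 ∨ ∃ i ∈ is, (t.drop i).take word.length = word ∧ cut t word i = u ∧ u ∉ V) := by
  intro is
  induction is with
  | nil =>
    intro st hst
    refine ⟨hst, fun _ u => ?_⟩
    simp
  | cons i rest ih =>
    intro st hst
    simp only [List.foldl_cons, emptyHitT, List.any_cons]
    by_cases hcond : (t.drop i).take word.length = word
    · by_cases hnil : cut t word i = []
      · have hstep : bStepN word V t st i = (true, st.2) := by
          simp [bStepN, hst, hcond, hnil]
        rw [hstep, foldl_fst_true _ (bStepN_true word V t)]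
        constructor
        · simp [hcond, hnil]
        · intro h; simp at h
      · by_cases hv : cut t word i ∈ V
        · have hstep : bStepN word V t st i = st := by
            simp only [bStepN, hst, Bool.false_eq_true, if_false]
            simp [hcond, hnil, hv]
          rw [hstep]
          obtain ⟨g1, g2⟩ := ih st hst
          refine ⟨by simp [g1, hcond, hnil, emptyHitT], fun hf u => ?_⟩
          rw [g2 hf u]
          constructor
          · rintro (h | h) 
            · exact Or.inl h
            · exact Or.inr (by rcases h with ⟨j, hj, h⟩; exact ⟨j, List.mem_cons_of_mem _ hj, h⟩)
          · rintro (h | ⟨j, hj, hc, hcut, hnv⟩)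
            · exact Or.inl h
            · rcases List.mem_cons.mp hj with rfl | hj
              · exact absurd (hcut ▸ hv) hnv
              · exact Or.inr ⟨j, hj, hc, hcut, hnv⟩
        · have hstep : bStepN word V t st i = (false, PySem.Set.add st.2 (cut t word i)) := by
            simp only [bStepN, hst, Bool.false_eq_true, if_false]
            simp [hcond, hnil, hv]
          rw [hstep]
          obtain ⟨g1, g2⟩ := ih (false, PySem.Set.add st.2 (cut t word i)) rfl
          refine ⟨by simp [g1, hcond, hnil, emptyHitT], fun hf u => ?_⟩
          rw [g2 hf u]
          simp only [PySem.Set.mem_add]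
          constructor
          · rintro ((h | rfl) | h)
            · exact Or.inl h
            · exact Or.inr ⟨i, List.mem_cons_self .., hcond, rfl, hv⟩
            · exact Or.inr (by rcases h with ⟨j, hj, h⟩; exact ⟨j, List.mem_cons_of_mem _ hj, h⟩)
          · rintro (h | ⟨j, hj, hc, hcut, hnv⟩)
            · exact Or.inl (Or.inl h)
            · rcases List.mem_cons.mp hj with rfl | hj
              · exact Or.inl (Or.inr hcut.symm)
              · exact Or.inr ⟨j, hj, hc, hcut, hnv⟩
    · have hstep : bStepN word V t st i = st := by
        simp [bStepN, hst, hcond]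
      rw [hstep]
      obtain ⟨g1, g2⟩ := ih st hst
      refine ⟨by simp [g1, hcond, emptyHitT], fun hf u => ?_⟩
      rw [g2 hf u]
      constructor
      · rintro (h | h)
        · exact Or.inl h
        · exact Or.inr (by rcases h with ⟨j, hj, h⟩; exact ⟨j, List.mem_cons_of_mem _ hj, h⟩)
      · rintro (h | ⟨j, hj, hc, hcut, hnv⟩)
        · exact Or.inl h
        · rcases List.mem_cons.mp hj with rfl | hj
          · exact absurd hc hcond
          · exact Or.inr ⟨j, hj, hc, hcut, hnv⟩

def bOuterN (word : List Char) (V : PySem.Set (List Char)) :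
    (Bool × PySem.Set (List Char)) → List Char → (Bool × PySem.Set (List Char)) := fun st t =>
  (List.range (t.length + 1 - word.length)).foldl (bStepN word V t) st

lemma bOuterN_true (word : List Char) (V : PySem.Set (List Char)) (t : List Char)
    (st : Bool × PySem.Set (List Char)) (h : st.1 = true) : bOuterN word V st t = st := by
  obtain ⟨b, x⟩ := st
  cases b
  · simp at h
  · exact foldl_fst_true _ (bStepN_true word V t) _ x

lemma bOuterChar (word : List Char) (V : PySem.Set (List Char)) :
    ∀ (ts : List (List Char)) (st : Bool × PySem.Set (List Char)), st.1 = false →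
      (ts.foldl (bOuterN word V) st).1
        = ts.any (fun t => emptyHitT word t (List.range (t.length + 1 - word.length))) ∧
      ((ts.foldl (bOuterN word V) st).1 = false → ∀ u,
        u ∈ (ts.foldl (bOuterN word V) st).2 ↔
          u ∈ st.2 ∨ ∃ t ∈ ts, ∃ i ∈ List.range (t.length + 1 - word.length),
            (t.drop i).take word.length = word ∧ cut t word i = u ∧ u ∉ V) := by
  intro ts
  induction ts with
  | nil =>
    intro st hst
    refine ⟨hst, fun _ u => ?_⟩
    simp
  | cons t rest ih =>
    intro st hst
    simp only [List.foldl_cons, List.any_cons]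
    obtain ⟨g1, g2⟩ := bInnerChar word V t (List.range (t.length + 1 - word.length)) st hst
    cases hh : (bOuterN word V st t).1 with
    | true =>
      have hE : emptyHitT word t (List.range (t.length + 1 - word.length)) = true := by
        rw [← g1]; exact hh
      have hinit : bOuterN word V st t = (true, (bOuterN word V st t).2) := by
        rw [← hh]
      rw [hinit, foldl_fst_true (bOuterN word V) (fun st x h => bOuterN_true word V x st h)]
      refine ⟨by simp [hE], fun hf => ?_⟩
      simp at hf
    | false =>
      obtain ⟨o1, o2⟩ := ih (bOuterN word V st t) hh
      have hE : emptyHitT word t (List.range (t.length + 1 - word.length)) = false := by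
        rw [← g1]; exact hh
      refine ⟨by rw [o1, hE]; simp, fun hf u => ?_⟩
      rw [o2 hf u]
      have g2' : ∀ u, u ∈ (bOuterN word V st t).2 ↔ u ∈ st.2 ∨
          ∃ i ∈ List.range (t.length + 1 - word.length),
            (t.drop i).take word.length = word ∧ cut t word i = u ∧ u ∉ V := g2 hh
      rw [g2' u]
      constructor
      · rintro ((h | ⟨i, hi, h⟩) | ⟨t', ht', h⟩)
        · exact Or.inl h
        · exact Or.inr ⟨t, List.mem_cons_self .., i, hi, h⟩
        · exact Or.inr ⟨t', List.mem_cons_of_mem _ ht', h⟩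
      · rintro (h | ⟨t', ht', i, hi, h⟩)
        · exact Or.inl (Or.inl h)
        · rcases List.mem_cons.mp ht' with rfl | ht'
          · exact Or.inl (Or.inr ⟨i, hi, h⟩)
          · exact Or.inr ⟨t', ht', i, hi, h⟩

-- B computes Rspec
lemma bLevels_spec {word : List Char} (hw : word ≠ []) (V : PySem.Set (List Char)) :
    ∀ fuel frontier, (∀ t ∈ frontier, t ≠ [] ∧ t ∉ V ∧ t.length ≤ fuel) →
      bLevels fuel word V frontier = frontier.any (fun t => Rspec word V (t.length + 1) t) := by
  intro fuel
  have hk : 0 < word.length := List.length_pos_iff.mpr hw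
  induction fuel with
  | zero =>
    intro frontier hinv
    cases frontier with
    | nil => rfl
    | cons t rest =>
      obtain ⟨hne, _, hlen⟩ := hinv t (List.mem_cons_self ..)
      exact absurd (List.eq_nil_of_length_eq_zero (by omega)) hne
  | succ fuel ih =>
    intro frontier hinv
    by_cases hfr : frontier = []
    · subst hfr; rfl
    · have hfrb : (frontier == ([] : List (List Char))) = false := by simp [hfr]
      rw [show bLevels (fuel + 1) word V frontier =
          (if (frontier.foldl (bOuterN word V) (false, PySem.Set.empty)).1 then true
           else bLevels fuel word V (frontier.foldl (bOuterN word V) (false, PySem.Set.empty)).2) from by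
        simp only [bLevels, hfrb, Bool.false_eq_true, if_false]
        simp only [pyRange_bridge_B, List.foldl_map, PySem.List.slice_natCast_add, cutB_eq]
        rfl]
      obtain ⟨g1, g2⟩ := bOuterChar word V frontier (false, PySem.Set.empty) rfl
      -- i ∈ range ∧ matching word ↔ i ∈ posNat
      have hpos : ∀ (t : List Char) (i : Nat), i ∈ List.range (t.length + 1 - word.length) →
          (t.drop i).take word.length = word → i ∈ posNat t word := by
        intro t i hi hc
        have := List.mem_range.mp hi
        exact mem_posNat.mpr ⟨by omega, hc⟩
      cases hE : (frontier.foldl (bOuterN word V) (false, PySem.Set.empty)).1 with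
      | true =>
        simp only [if_true]
        rw [g1] at hE
        obtain ⟨t, ht, hhit⟩ := List.any_eq_true.mp hE
        obtain ⟨i, hi, hib⟩ := List.any_eq_true.mp hhit
        rw [Bool.and_eq_true, beq_iff_eq, beq_iff_eq] at hib
        obtain ⟨hcond, hnil⟩ := hib
        obtain ⟨htne, htnv, htlen⟩ := hinv t ht
        symm
        rw [List.any_eq_true]
        refine ⟨t, ht, ?_⟩
        simp only [Rspec, htne, htnv, if_false]
        rw [List.any_eq_true]
        refine ⟨i, hpos t i hi hcond, ?_⟩
        rw [hnil]
        have : 0 < t.length := List.length_pos_iff.mpr htne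
        cases hl : t.length with
        | zero => omega
        | succ m => simp [Rspec]
      | false =>
        simp only [Bool.false_eq_true, if_false]
        have hmem := g2 hE
        -- no occurrence anywhere deletes to the empty string
        have hnoEmpty : ∀ t ∈ frontier, ∀ i ∈ List.range (t.length + 1 - word.length),
            (t.drop i).take word.length = word → cut t word i ≠ [] := by
          intro t ht i hi hc hnil
          rw [g1] at hE
          have := List.any_eq_false.mp hE t ht
          exact this (List.any_eq_true.mpr ⟨i, hi, by simp [hc, hnil]⟩)
        have hinv2 : ∀ u ∈ (frontier.foldl (bOuterN word V) (false, PySem.Set.empty)).2,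
            u ≠ [] ∧ u ∉ V ∧ u.length ≤ fuel := by
          intro u hu
          rcases (hmem u).mp hu with h | ⟨t, ht, i, hi, hcond, hcut, hnv⟩
          · simp [PySem.Set.empty] at h
          · have hip := hpos t i hi hcond
            have hlc := len_cut hip
            obtain ⟨_, _, htlen⟩ := hinv t ht
            refine ⟨hcut ▸ hnoEmpty t ht i hi hcond, hnv, ?_⟩
            rw [← hcut]; omega
        rw [ih _ hinv2]
        -- both sides test reachability of the next level
        cases hA : frontier.any (fun t => Rspec word V (t.length + 1) t) with
        | true =>
          obtain ⟨t, ht, hRt⟩ := List.any_eq_true.mp hA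
          obtain ⟨htne, htnv, htlen⟩ := hinv t ht
          rw [show Rspec word V (t.length + 1) t
              = (posNat t word).any (fun i => Rspec word V t.length (cut t word i)) from by
            simp [Rspec, htne, htnv]] at hRt
          obtain ⟨i, hi, hRc⟩ := List.any_eq_true.mp hRt
          have hlc := len_cut hi
          have hirange : i ∈ List.range (t.length + 1 - word.length) := by
            rw [List.mem_range]
            have := (mem_posNat.mp hi).1
            omega
          have hcond := (mem_posNat.mp hi).2
          have hcne : cut t word i ≠ [] := hnoEmpty t ht i hirange hcond
          have htpos : 0 < t.length := List.length_pos_iff.mpr htne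
          have hcnv : cut t word i ∉ V := by
            intro hv
            rw [show Rspec word V t.length (cut t word i) = false from by
              cases hl : t.length with
              | zero => omega
              | succ m => simp [Rspec, hcne, hv]] at hRc
            exact absurd hRc (by simp)
          rw [List.any_eq_true]
          refine ⟨cut t word i, (hmem _).mpr (Or.inr ⟨t, ht, i, hirange, hcond, rfl, hcnv⟩), ?_⟩
          rw [← Rspec_stable hw V t.length ((cut t word i).length + 1) (cut t word i) (by omega) (by omega)]
          exact hRc
        | false =>
          rw [List.any_eq_false]
          intro u hu
          rcases (hmem u).mp hu with h | ⟨t, ht, i, hi, hcond, hcut, hnv⟩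
          · simp [PySem.Set.empty] at h
          · have hip := hpos t i hi hcond
            have hlc := len_cut hip
            obtain ⟨htne, htnv, htlen⟩ := hinv t ht
            have hRt := List.any_eq_false.mp hA t ht
            rw [show Rspec word V (t.length + 1) t
                = (posNat t word).any (fun i => Rspec word V t.length (cut t word i)) from by
              simp [Rspec, htne, htnv]] at hRt
            have hfalse : Rspec word V t.length (cut t word i) = false := by
              cases hg : Rspec word V t.length (cut t word i) with
              | false => rfl
              | true => exact absurd (List.any_eq_true.mpr ⟨i, hip, hg⟩) hRt
            rw [hcut] at hfalse hlc
            rw [← Rspec_stable hw V t.length (u.length + 1) u (by omega) (by omega)]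
            simp [hfalse]

-- ===== VERDICT (by name: the statement is the Claim_ definition above) =====
theorem s_can_be_reduced_to_word_spec : Claim_equal_s_can_be_reduced_to_word := by
  intro s word cache _ hpre
  unfold Spec_s_can_be_reduced_to_word
  unfold s_can_be_reduced_to_word s_can_be_reduced_to_word_alt
  by_cases hs : s.toList = []
  · rw [hs]
    simp [sRec]
  · have hsb : (s.toList == ([] : List Char)) = false := by simp [hs]
    by_cases hcn : PySem.Set.contains (PySem.Set.ofList (cache.map String.toList)) s.toList = true
    · have hlen : s.toList.length + 1 = s.toList.length + 1 := rfl
      cases hl : s.toList.length with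
      | zero => exact absurd (List.eq_nil_of_length_eq_zero hl) hs
      | succ m =>
        simp only [sRec, hsb, Bool.false_eq_true, if_false, hcn, if_true]
    · have hw' : word.toList ≠ [] := by
        rcases hpre with h | h | h
        · intro hnil
          exact h (String.toList_inj.mp (by simp [hnil]))
        · exact absurd (by rw [h]; rfl) hs
        · exact absurd ((contains_iff_mem _ _).mpr ((PySem.Set.mem_ofList _ _).mpr
            (List.mem_map_of_mem h))) hcn
      have hwb : (word.toList == ([] : List Char)) = false := by simp [hw']
      have hdead : DeadExt word.toList (PySem.Set.ofList (cache.map String.toList))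
          (PySem.Set.ofList (cache.map String.toList)) :=
        ⟨fun x h => h, fun x h => Or.inl h⟩
      obtain ⟨hA, _⟩ := sRec_spec hw' (PySem.Set.ofList (cache.map String.toList))
        (s.toList.length + 1) s.toList (PySem.Set.ofList (cache.map String.toList))
        (Nat.lt_succ_self _) hdead
      rw [hA]
      have hadd : PySem.Set.add PySem.Set.empty s.toList = [s.toList] := rfl
      have hnv : s.toList ∉ PySem.Set.ofList (cache.map String.toList) := by
        intro h
        exact hcn ((contains_iff_mem _ _).mpr h)
      have hB := bLevels_spec hw' (PySem.Set.ofList (cache.map String.toList))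
        s.toList.length [s.toList]
        (by
          intro t ht
          rcases List.mem_singleton.mp ht with rfl
          exact ⟨hs, hnv, le_refl _⟩)
      simp only [hsb, Bool.false_eq_true, if_false, hcn, hwb, hadd, hB]
      simp

-- the crash-fix block: Raises_ lies outside Pre_, and at the witness ("a", "", [])
-- port B returns false where Python A hits RecursionError
@[simp]
theorem s_can_be_reduced_to_word_raises : Claim_raises_s_can_be_reduced_to_word := by
  unfold Claim_raises_s_can_be_reduced_to_word
  constructor
  · intro s word cache _ hr hp
    rcases hr with ⟨h1, h2, h3⟩
    rcases hp with h | h | h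
    · exact h h1
    · exact h2 h
    · exact h3 h
  · refine ⟨by decide, by decide, by decide⟩
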